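/- GENERATED by c/gen_decode.py: decode facts of the image, one per distinct instruction byte string. -/
import UserX.DecodeImage

#decode_all ProgX.Base.Dec
  "0f874f010000"  -- ja 10275e
  "440fb67d00"  -- movzx r15d,BYTE PTR [rbp+0x0]
  "4883c408"  -- add rsp,0x8
  "4889d5"  -- mov rbp,rdx
  "488d443240"  -- lea rax,[rdx+rsi*1+0x40]
  "4989c4"  -- mov r12,rax
  "4c89e0"  -- mov rax,r12
  "660f2ec1"  -- ucomisd xmm0,xmm1
  "72e7"  -- jb 101538
  "7510"  -- jne 103b5a
  "7e01"  -- jle 100325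
  "8d8102fcffff"  -- lea eax,[rcx-0x3fe]
  "d1ef"  -- shr edi,1
  "e894f3ffff"  -- call 101d00
  "e8edecffff"  -- call 100300
  "ebe3"  -- jmp 102d05
  "f20f580593d70300"  -- addsd xmm0,QWORD PTR [rip+0x3d793]
  "f20f59350cdb0300"  -- mulsd xmm6,QWORD PTR [rip+0x3db0c]
  "f20f5e15bbd90300"  -- divsd xmm2,QWORD PTR [rip+0x3d9bb]
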